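-- pv_equiv track=rewrite | github.com/navaraja20/Multi--PDF--RAG-Chatbot | scraper/clean_text.py | _merge_fragments
-- ===== SOURCE A (Python) =====
-- from typing import Iterable
--
-- def _merge_fragments(lines: Iterable[str]) -> list[str]:
--     merged: list[str] = []
--     for line in lines:
--         cleaned = line.strip()
--         if not cleaned:
--             continue
--         if merged and cleaned == merged[-1]:
--             continue
--         merged.append(cleaned)
--     return merged
-- ===== SOURCE B (Python) =====
-- def _collapse(xs):
--     # divide and conquer: collapse each half, then merge at the boundary
--     if len(xs) <= 1:
--         return xs[:]
--     mid = len(xs) // 2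
--     left = _collapse(xs[:mid])
--     right = _collapse(xs[mid:])
--     if left and right and left[-1] == right[0]:
--         return left + right[1:]
--     return left + right
--
-- def _merge_fragments(lines):
--     clean = [s for s in (line.strip() for line in lines) if s]
--     return _collapse(clean)
-- ===== Notes on version B (the rewrite author's own statement) =====
-- stated objective: alternative
-- what changed: Replaced A's single left-to-right accumulating loop (comparing each line to merged[-1]) by a cleaning pass followed by a divide-and-conquer collapse: split the cleaned list in half, recursively collapse each half, and join the halves dropping the right half's head when it equals the left half's last element.
import Mathlib
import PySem

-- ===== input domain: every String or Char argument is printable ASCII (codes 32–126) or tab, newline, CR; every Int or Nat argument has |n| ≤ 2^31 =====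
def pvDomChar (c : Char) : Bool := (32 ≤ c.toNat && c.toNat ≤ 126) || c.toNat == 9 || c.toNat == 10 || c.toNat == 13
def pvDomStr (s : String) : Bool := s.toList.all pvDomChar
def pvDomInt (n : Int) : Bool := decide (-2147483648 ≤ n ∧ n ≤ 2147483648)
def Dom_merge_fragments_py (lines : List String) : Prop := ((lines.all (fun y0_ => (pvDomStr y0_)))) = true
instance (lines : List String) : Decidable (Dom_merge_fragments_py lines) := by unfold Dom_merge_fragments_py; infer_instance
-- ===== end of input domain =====

-- B replaces A's single accumulating loop (checking merged[-1]) by a cleaning pass and a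
-- divide-and-conquer collapse of consecutive duplicates. Objective: alternative (not faster).

-- ===== PORT A =====
-- one loop step: strip, skip empty, skip when equal to merged[-1], else append
def mfStep (merged : List String) (line : String) : List String :=
  let cleaned := PySem.Str.strip line
  if cleaned = "" then merged
  else if merged ≠ [] ∧ merged.getLast? = some cleaned then merged
  else merged ++ [cleaned]

def merge_fragments_py (lines : List String) : List String :=
  lines.foldl mfStep []

-- ===== PORT B =====
-- _collapse: xs[:mid] / xs[mid:] with 0 ≤ mid ≤ len xs are exactly take/drop;
-- the fuel argument (initialised to xs.length, always sufficient) only makes the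
-- halving recursion structural — it never changes the computed value.
def dcCollapseF : Nat → List String → List String
  | 0, xs => xs
  | fuel + 1, xs =>
    if xs.length ≤ 1 then xs
    else
      let mid := xs.length / 2
      let left := dcCollapseF fuel (xs.take mid)
      let right := dcCollapseF fuel (xs.drop mid)
      if left ≠ [] ∧ right ≠ [] ∧ left.getLast? = right.head? then left ++ right.tail
      else left ++ right

def dcCollapse (xs : List String) : List String := dcCollapseF xs.length xs

def merge_fragments_py_alt (lines : List String) : List String :=
  dcCollapse (((lines.map PySem.Str.strip).filter (fun s => s ≠ "")))

-- ===== PRECONDITION & SPEC =====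
def Spec_merge_fragments_py (lines : List String) (out : List String) : Prop := out = merge_fragments_py_alt lines
instance (lines : List String) (out : List String) : Decidable (Spec_merge_fragments_py lines out) := by unfold Spec_merge_fragments_py; infer_instance

-- ===== CLAIM (what is proved, stated in full; the proofs are below) =====
def Claim_equal_merge_fragments_py : Prop := ∀ (lines : List String), Dom_merge_fragments_py lines → Spec_merge_fragments_py lines (merge_fragments_py lines)

-- ===== LEMMAS AND PROOFS =====

-- dedup against a carried "previous element" value
def mfDedup : Option String → List String → List String
  | _, [] => []
  | last, x :: xs => if some x = last then mfDedup last xs else x :: mfDedup (some x) xs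

theorem mf_foldl_eq (lines : List String) : ∀ merged,
    lines.foldl mfStep merged
      = merged ++ mfDedup merged.getLast? ((lines.map PySem.Str.strip).filter (fun s => s ≠ "")) := by
  induction lines with
  | nil => intro merged; simp [mfDedup]
  | cons l ls ih =>
    intro merged
    simp only [List.foldl_cons, List.map_cons]
    by_cases he : PySem.Str.strip l = ""
    · rw [show mfStep merged l = merged from by simp [mfStep, he]]
      rw [ih]
      simp [he]
    · by_cases hd : merged ≠ [] ∧ merged.getLast? = some (PySem.Str.strip l)
      · rw [show mfStep merged l = merged from by simp [mfStep, he, hd]]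
        rw [ih]
        simp [he, mfDedup, hd.2]
      · rw [show mfStep merged l = merged ++ [PySem.Str.strip l] from by simp [mfStep, he, hd]]
        rw [ih]
        have hne : ¬ (some (PySem.Str.strip l) = merged.getLast?) := by
          rcases Decidable.not_and_iff_not_or_not.mp hd with h | h
          · rcases Decidable.not_not.mp h with rfl
            simp
          · exact fun hc => h hc.symm
        simp [he, mfDedup, hne, List.getLast?_append]

-- the carried value after deduping xs starting from l
def mfCarry (l : Option String) (xs : List String) : Option String :=
  (mfDedup l xs).getLast?.or l

theorem mfDedup_append (xs : List String) : ∀ (l : Option String) (ys : List String),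
    mfDedup l (xs ++ ys) = mfDedup l xs ++ mfDedup (mfCarry l xs) ys := by
  induction xs with
  | nil => intro l ys; simp [mfDedup, mfCarry]
  | cons x xs ih =>
    intro l ys
    by_cases h : some x = l
    · simp [mfDedup, h, ih, mfCarry]
    · simp only [List.cons_append, mfDedup, if_neg h, ih]
      have hcar : mfCarry l (x :: xs) = mfCarry (some x) xs := by
        simp only [mfCarry, mfDedup, if_neg h]
        cases ht : mfDedup (some x) xs with
        | nil => simp
        | cons a as =>
          obtain ⟨w, hw⟩ : ∃ w, (a :: as).getLast? = some w := by
            cases hgl : (a :: as).getLast? with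
            | none => exact absurd (List.getLast?_eq_none_iff.mp hgl) (by simp)
            | some w => exact ⟨w, rfl⟩
          simp [List.getLast?_cons_cons, hw]
      rw [hcar]

-- shifting the carried value: dedup from (some v) relates to dedup from none by the head
theorem mfDedup_some (v : String) (ys : List String) :
    mfDedup (some v) ys
      = if (mfDedup none ys).head? = some v then (mfDedup none ys).tail else mfDedup none ys := by
  cases ys with
  | nil => simp [mfDedup]
  | cons y ys =>
    by_cases h : y = v
    · subst h
      simp [mfDedup]
    · have h1 : ¬ (some y = some v) := by simp [h]
      have h2 : ¬ ((some y : Option String) = none) := by simp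
      simp [mfDedup, h1, h2]

theorem mfDedup_none_ne_nil (xs : List String) (h : xs ≠ []) : mfDedup none xs ≠ [] := by
  cases xs with
  | nil => exact absurd rfl h
  | cons x xs => simp [mfDedup]

theorem dcCollapseF_eq : ∀ (n : ℕ) (xs : List String), xs.length ≤ n →
    dcCollapseF n xs = mfDedup none xs := by
  intro n
  induction n with
  | zero =>
    intro xs h
    have : xs = [] := by
      cases xs with
      | nil => rfl
      | cons a as => simp at h
    subst this; simp [dcCollapseF, mfDedup]
  | succ n ih =>
    intro xs hlen
    by_cases hs : xs.length ≤ 1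
    · rw [dcCollapseF, if_pos hs]
      cases xs with
      | nil => simp [mfDedup]
      | cons x t =>
        have : t = [] := by
          cases t with
          | nil => rfl
          | cons b bs => simp at hs
        subst this; simp [mfDedup]
    · rw [dcCollapseF, if_neg hs]
      have h2 : 2 ≤ xs.length := by omega
      set mid := xs.length / 2 with hmid
      have hm1 : 1 ≤ mid := by omega
      have hmlt : mid < xs.length := by omega
      have hL : dcCollapseF n (xs.take mid) = mfDedup none (xs.take mid) :=
        ih _ (by rw [List.length_take]; omega)
      have hR : dcCollapseF n (xs.drop mid) = mfDedup none (xs.drop mid) :=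
        ih _ (by rw [List.length_drop]; omega)
      simp only [hL, hR]
      have htl : (xs.take mid).length = mid := by rw [List.length_take]; omega
      have hdl : (xs.drop mid).length = xs.length - mid := by rw [List.length_drop]
      have htne : xs.take mid ≠ [] := by
        intro hc; rw [hc] at htl; simp at htl; omega
      have hdne : xs.drop mid ≠ [] := by
        intro hc; rw [hc] at hdl; simp at hdl; omega
      have hLne := mfDedup_none_ne_nil _ htne
      have hRne := mfDedup_none_ne_nil _ hdne
      -- rewrite the spec side via the append and carry lemmas
      have hsplit : xs = xs.take mid ++ xs.drop mid := (List.take_append_drop mid xs).symm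
      conv_rhs => rw [hsplit]
      rw [mfDedup_append]
      have hcarry : mfCarry none (xs.take mid) = (mfDedup none (xs.take mid)).getLast? := by
        simp [mfCarry]
      obtain ⟨v, hv⟩ : ∃ v, (mfDedup none (xs.take mid)).getLast? = some v := by
        cases hgl : (mfDedup none (xs.take mid)).getLast? with
        | none => exact absurd (List.getLast?_eq_none_iff.mp hgl) hLne
        | some v => exact ⟨v, rfl⟩
      rw [hcarry, hv, mfDedup_some]
      by_cases hb : (mfDedup none (xs.drop mid)).head? = some v
      · rw [if_pos hb, if_pos ⟨hLne, hRne, hb.symm⟩]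
      · rw [if_neg hb, if_neg (fun h => hb h.2.2.symm)]

-- ===== VERDICT (by name: the statement is the Claim_ definition above) =====
theorem merge_fragments_py_spec : Claim_equal_merge_fragments_py := by
  intro lines _
  unfold Spec_merge_fragments_py merge_fragments_py merge_fragments_py_alt
  rw [mf_foldl_eq]
  unfold dcCollapse
  rw [dcCollapseF_eq _ _ (le_refl _)]
  simp
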